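-- pv_equiv track=rewrite | github.com/PL-play/zero-code | core/attachments.py | _subsequence_score
-- ===== SOURCE A (Python) =====
-- def _subsequence_score(query: str, candidate: str) -> int | None:
--     if not query:
--         return 0
--
--     query = query.lower()
--     candidate = candidate.lower()
--     pos = -1
--     gap_penalty = 0
--     for char in query:
--         next_pos = candidate.find(char, pos + 1)
--         if next_pos < 0:
--             return None
--         if pos >= 0:
--             gap_penalty += next_pos - pos - 1
--         pos = next_pos
--     return gap_penalty
-- ===== SOURCE B (Python) =====
-- def _subsequence_score(query: str, candidate: str) -> int | None:
--     if not query: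
--         return 0
--     q = query.lower()
--     c = candidate.lower()
--     qi = 0
--     last = -1
--     gap_penalty = 0
--     for i, ch in enumerate(c):
--         if qi < len(q) and ch == q[qi]:
--             if qi > 0:
--                 gap_penalty += i - last - 1
--             last = i
--             qi += 1
--     if qi < len(q):
--         return None
--     return gap_penalty
-- ===== Notes on version B (the rewrite author's own statement) =====
-- stated objective: alternative
-- what changed: B replaces A's per-query-character str.find calls with a single forward scan over the candidate that advances a query index, accumulating the gap penalty at each match.
import Mathlib
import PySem

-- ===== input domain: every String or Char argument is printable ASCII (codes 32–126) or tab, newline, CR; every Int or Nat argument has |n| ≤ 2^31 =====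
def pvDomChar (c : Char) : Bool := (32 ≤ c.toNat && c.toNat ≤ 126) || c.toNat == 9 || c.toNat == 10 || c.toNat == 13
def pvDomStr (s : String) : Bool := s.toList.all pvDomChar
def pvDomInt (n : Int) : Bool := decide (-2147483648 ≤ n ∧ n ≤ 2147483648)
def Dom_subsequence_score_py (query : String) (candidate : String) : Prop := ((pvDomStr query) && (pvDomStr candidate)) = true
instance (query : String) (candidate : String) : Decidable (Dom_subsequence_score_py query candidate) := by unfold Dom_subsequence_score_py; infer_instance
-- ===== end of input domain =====

-- B replaces A's per-query-character str.find calls by a single forward scan over the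
-- candidate carrying a query index and the last matched position (alternative decomposition,
-- same greedy result).

-- ===== PORT A =====
-- loop "for char in query" of A, state (pos, gap_penalty)
def pvLoopA (cand : String) : List Char → Int → Int → Option Int
  | [], _, gap => some gap
  | ch :: rest, pos, gap =>
    let np := PySem.Str.findFrom cand (String.ofList [ch]) (pos + 1)
    if np < 0 then none
    else pvLoopA cand rest np (if 0 ≤ pos then gap + (np - pos - 1) else gap)

def subsequence_score_py (query : String) (candidate : String) : Option Int :=
  if query = "" then some 0
  else pvLoopA (PySem.Str.lower candidate) (PySem.Str.lower query).toList (-1) 0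

-- ===== PORT B =====
-- loop "for i, ch in enumerate(c)" of B, state (qi, last, gap_penalty)
def pvLoopB (q : List Char) : List Char → Nat → Nat → Int → Int → Nat × Int
  | [], _, qi, _, gap => (qi, gap)
  | ch :: cs, i, qi, last, gap =>
    if q[qi]? = some ch then
      pvLoopB q cs (i + 1) (qi + 1) (i : Int)
        (if 0 < qi then gap + ((i : Int) - last - 1) else gap)
    else pvLoopB q cs (i + 1) qi last gap

def subsequence_score_py_alt (query : String) (candidate : String) : Option Int :=
  if query = "" then some 0
  else
    let q := (PySem.Str.lower query).toList
    let c := (PySem.Str.lower candidate).toList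
    let r := pvLoopB q c 0 0 (-1) 0
    if r.1 < q.length then none else some r.2

-- ===== PRECONDITION & SPEC =====
def Spec_subsequence_score_py (query : String) (candidate : String) (out : Option Int) : Prop := out = subsequence_score_py_alt query candidate
instance (query : String) (candidate : String) (out : Option Int) : Decidable (Spec_subsequence_score_py query candidate out) := by unfold Spec_subsequence_score_py; infer_instance

-- ===== CLAIM (what is proved, stated in full; the proofs are below) =====
def Claim_equal_subsequence_score_py : Prop := ∀ (query : String) (candidate : String), Dom_subsequence_score_py query candidate → Spec_subsequence_score_py query candidate (subsequence_score_py query candidate)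

-- ===== LEMMAS AND PROOFS =====

-- first index (relative) of character q in a list, B-style scan
def pvFfind : List Char → Char → Option Nat
  | [], _ => none
  | c :: cs, q => if c = q then some 0 else (pvFfind cs q).map (· + 1)

-- A's loop re-expressed with pvFfind instead of str.find (bridge between the two ports)
def pvArec (cand : List Char) : List Char → Nat → Int → Int → Option Int
  | [], _, _, gap => some gap
  | q :: qrem, k, pos, gap =>
    match pvFfind (cand.drop k) q with
    | none => none
    | some j =>
      pvArec cand qrem (k + j + 1) ((k + j : Nat) : Int)
        (if 0 ≤ pos then gap + (((k + j : Nat) : Int) - pos - 1) else gap)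

theorem pv_single_infix (q : Char) (cs : List Char) : [q] <:+: cs ↔ q ∈ cs := by
  constructor
  · rintro ⟨s, t, rfl⟩; simp
  · intro h
    obtain ⟨s, t, rfl⟩ := List.append_of_mem h
    exact ⟨s, t, by simp⟩

theorem pvFfind_none (cs : List Char) (q : Char) : pvFfind cs q = none ↔ q ∉ cs := by
  induction cs with
  | nil => simp [pvFfind]
  | cons c cs ih =>
    by_cases hc : c = q
    · subst hc; simp [pvFfind]
    · simp [pvFfind, hc, Option.map_eq_none_iff, ih, Ne.symm hc]

theorem pvFfind_some : ∀ {cs : List Char} {q : Char} {j : Nat}, pvFfind cs q = some j →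
    ([q] <+: cs.drop j ∧ ∀ i < j, ¬ [q] <+: cs.drop i) ∧ j < cs.length := by
  intro cs
  induction cs with
  | nil => intro q j h; simp [pvFfind] at h
  | cons c cs ih =>
    intro q j h
    by_cases hc : c = q
    · subst hc
      simp [pvFfind] at h
      subst h
      exact ⟨⟨⟨cs, rfl⟩, fun i hi => absurd hi (by omega)⟩, by simp⟩
    · simp [pvFfind, hc] at h
      obtain ⟨j', hj', rfl⟩ := h
      obtain ⟨⟨hpre, hmin⟩, hlt⟩ := ih hj'
      refine ⟨⟨by simpa using hpre, ?_⟩, by simpa using hlt⟩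
      intro i hi
      cases i with
      | zero =>
        intro hcon
        rw [List.drop_zero, List.cons_prefix_cons] at hcon
        exact hc hcon.1.symm
      | succ i' => simpa using hmin i' (by omega)

theorem pv_find_unique (cs : List Char) (q : Char) (j : Nat)
    (h1 : [q] <+: cs.drop j) (h2 : ∀ i < j, ¬ [q] <+: cs.drop i) :
    PySem.Chars.find cs [q] = (j : Int) := by
  have hinf : [q] <:+: cs := h1.isInfix.trans (cs.drop_suffix j).isInfix
  have hnn : 0 ≤ PySem.Chars.find cs [q] := (PySem.Chars.find_nonneg_iff cs [q]).2 hinf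
  obtain ⟨hp, hm⟩ := PySem.Chars.find_spec hnn
  set f := (PySem.Chars.find cs [q]).toNat with hf
  have : f = j := by
    rcases Nat.lt_trichotomy f j with h | h | h
    · exact absurd hp (h2 f h)
    · exact h
    · exact absurd h1 (hm j h)
  omega

theorem pv_find_eq_ffind (cs : List Char) (q : Char) :
    PySem.Chars.find cs [q] =
      (match pvFfind cs q with | none => -1 | some j => (j : Int)) := by
  cases h : pvFfind cs q with
  | none =>
    simp only []
    rw [PySem.Chars.find_eq_neg_one_iff, pv_single_infix]
    exact (pvFfind_none cs q).1 h
  | some j =>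
    obtain ⟨⟨h1, h2⟩, _⟩ := pvFfind_some h
    simpa using pv_find_unique cs q j h1 h2

theorem pvF (cand : List Char) (q : Char) (k : Nat) (hk : k ≤ cand.length) :
    PySem.Chars.findFrom cand [q] (k : Int) =
      (match pvFfind (cand.drop k) q with | none => -1 | some j => ((k + j : Nat) : Int)) := by
  rw [PySem.Chars.findFrom_natCast cand [q] k hk, pv_find_eq_ffind]
  cases h : pvFfind (cand.drop k) q with
  | none => simp
  | some j => simp

-- A's string-level loop equals the pvFfind-based recursion
theorem pvH (cand : String) : ∀ (qs : List Char) (k : Nat) (gap : Int),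
    k ≤ cand.toList.length →
    pvLoopA cand qs ((k : Int) - 1) gap = pvArec cand.toList qs k ((k : Int) - 1) gap := by
  intro qs
  induction qs with
  | nil => intro k gap hk; simp [pvLoopA, pvArec]
  | cons ch rest ih =>
    intro k gap hk
    have hstep : ((k : Int) - 1 + 1) = (k : Int) := by ring
    simp only [pvLoopA, pvArec, hstep, PySem.Str.findFrom_eq]
    rw [show (String.ofList [ch]).toList = [ch] from by simp, pvF cand.toList ch k hk]
    cases h : pvFfind (cand.toList.drop k) ch with
    | none => simp
    | some j =>
      have hlt : j < (cand.toList.drop k).length := (pvFfind_some h).2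
      have hklen : k + j + 1 ≤ cand.toList.length := by
        rw [List.length_drop] at hlt; omega
      have hnn : ¬ ((k + j : Nat) : Int) < 0 := by omega
      simp only [hnn, if_false]
      have hrw : ((k + j : Nat) : Int) = ((k + j + 1 : Nat) : Int) - 1 := by push_cast; ring
      rw [hrw, ih (k + j + 1) _ hklen]

theorem pvLoopB_done (ql : List Char) : ∀ (cs : List Char) (i qi : Nat) (last gap : Int),
    ql.length ≤ qi → pvLoopB ql cs i qi last gap = (qi, gap) := by
  intro cs
  induction cs with
  | nil => intro i qi last gap h; simp [pvLoopB]
  | cons c cs ih =>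
    intro i qi last gap h
    have : ql[qi]? = none := by
      rw [List.getElem?_eq_none_iff]; omega
    simp [pvLoopB, this]
    exact ih _ _ _ _ h

-- main bridge: pvArec equals B's scan followed by the final qi check
theorem pvG (ql cand : List Char) : ∀ (cs : List Char) (k qi : Nat) (last gap : Int),
    cs = cand.drop k → (0 < qi ↔ 0 ≤ last) →
    pvArec cand (ql.drop qi) k last gap =
      (let r := pvLoopB ql cs k qi last gap; if r.1 < ql.length then none else some r.2) := by
  intro cs
  induction cs with
  | nil =>
    intro k qi last gap hk _
    cases hd : ql.drop qi with
    | nil =>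
      have hqi : ql.length ≤ qi := by
        have := congrArg List.length hd; simp at this; omega
      simp [pvArec, pvLoopB, Nat.not_lt.2 hqi]
    | cons q qrem =>
      have hqi : qi < ql.length := by
        have := congrArg List.length hd; simp at this; omega
      simp [pvArec, pvLoopB, ← hk, pvFfind, hqi]
  | cons c cs' ih =>
    intro k qi last gap hk hinv
    have hk' : cs' = cand.drop (k + 1) := by
      rw [← List.tail_drop, ← hk]
      rfl
    cases hd : ql.drop qi with
    | nil =>
      have hqi : ql.length ≤ qi := by
        have := congrArg List.length hd; simp at this; omega
      rw [pvLoopB_done ql _ _ _ _ _ hqi]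
      simp [pvArec, Nat.not_lt.2 hqi]
    | cons q qrem =>
      have hget : ql[qi]? = some q := by
        have h0 : (ql.drop qi)[0]? = some q := by simp [hd]
        rwa [List.getElem?_drop, Nat.add_zero] at h0
      have hqrem : ql.drop (qi + 1) = qrem := by
        rw [← List.tail_drop, hd]; rfl
      by_cases hc : c = q
      · subst hc
        have hff : pvFfind (cand.drop k) c = some 0 := by
          rw [← hk]; simp [pvFfind]
        simp only [pvArec, hff, Nat.add_zero]
        have hcond : ql[qi]? = some c := hget
        simp only [pvLoopB, hcond]
        have hgap : (if 0 ≤ last then gap + (((k : Nat) : Int) - last - 1) else gap)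
            = (if 0 < qi then gap + ((k : Int) - last - 1) else gap) := by
          rcases hinv with ⟨h1, h2⟩
          by_cases hl : 0 ≤ last
          · rw [if_pos hl, if_pos (h2 hl)]
          · rw [if_neg hl, if_neg (fun hq => hl (h1 hq))]
        rw [hgap]
        have ihx := ih (k + 1) (qi + 1) ((k : Nat) : Int)
          (if 0 < qi then gap + ((k : Int) - last - 1) else gap) hk'
          ⟨fun _ => by omega, fun _ => by omega⟩
        rw [hqrem] at ihx
        exact ihx
      · have hne : ql[qi]? ≠ some c := by
          rw [hget]; intro h; exact hc (Option.some.inj h).symm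
        have hB : pvLoopB ql (c :: cs') k qi last gap = pvLoopB ql cs' (k + 1) qi last gap := by
          simp only [pvLoopB, if_neg hne]
        have hshift : pvArec cand (q :: qrem) k last gap
            = pvArec cand (q :: qrem) (k + 1) last gap := by
          have hdk : cand.drop k = c :: cand.drop (k + 1) := by rw [← hk', ← hk]
          simp only [pvArec, hdk, pvFfind, if_neg hc]
          cases hj : pvFfind (cand.drop (k + 1)) q with
          | none => simp
          | some j =>
            simp only [Option.map_some]
            have e1 : k + (j + 1) + 1 = k + 1 + j + 1 := by omega
            have e2 : k + (j + 1) = k + 1 + j := by omega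
            rw [e1, e2]
        refine Eq.trans ?_ (Eq.trans (ih (k + 1) qi last gap hk' hinv) ?_)
        · rw [hd]; exact hshift
        · simp only [hB]

-- ===== VERDICT (by name: the statement is the Claim_ definition above) =====
theorem subsequence_score_py_spec : Claim_equal_subsequence_score_py := by
  intro query candidate _
  unfold Spec_subsequence_score_py subsequence_score_py subsequence_score_py_alt
  by_cases hq : query = ""
  · simp [hq]
  · simp only [hq, if_false]
    have h0 : (-1 : Int) = ((0 : Nat) : Int) - 1 := by norm_num
    rw [h0, pvH (PySem.Str.lower candidate) (PySem.Str.lower query).toList 0 0 (by omega)]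
    have hG := pvG (PySem.Str.lower query).toList (PySem.Str.lower candidate).toList
      (PySem.Str.lower candidate).toList 0 0 (((0 : Nat) : Int) - 1) 0 (by simp)
      (by constructor <;> intro h <;> omega)
    rw [List.drop_zero] at hG
    rw [hG]
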